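-- pv_equiv track=rewrite | github.com/moonstachain/ai-da-guan-jia | scripts/ccswitch_openrouter_bridge.py | top_level_assignment_keys
-- ===== SOURCE A (Python) =====
-- def top_level_assignment_keys(raw: str) -> set[str]:
--     keys: set[str] = set()
--     current_table: str | None = None
--     for line in raw.splitlines():
--         stripped = line.strip()
--         if not stripped or stripped.startswith("#"):
--             continue
--         if stripped.startswith("[") and stripped.endswith("]"):
--             current_table = stripped
--             continue
--         if current_table is None and "=" in stripped:
--             key = stripped.split("=", 1)[0].strip()
--             if key:
--                 keys.add(key)
--     return keys
-- ===== SOURCE B (Python) =====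
-- def top_level_assignment_keys(raw: str) -> set[str]:
--     lines = raw.splitlines()
--     # Keys only count before the first table header, and a table header is
--     # never "unset": index all header lines up front and slice off the prefix.
--     headers = [i for i, line in enumerate(lines)
--                if line.strip().startswith("[") and line.strip().endswith("]")]
--     cut = headers[0] if headers else len(lines)
--     keys: set[str] = set()
--     for line in lines[:cut]:
--         head, sep, _tail = line.strip().partition("=")
--         key = head.strip()
--         if sep and key and not key.startswith("#"):
--             keys.add(key)
--     return keys
-- ===== Notes on version B (the rewrite author's own statement) =====
-- stated objective: alternative
-- what changed: Instead of one stateful scan with a latching current_table flag and three sequenced line guards, B indexes all table-header line numbers with an enumerate comprehension, slices the line list at the first one, and filters that prefix with a single predicate built from str.partition at the equals sign applied to the stripped key itself (the truthiness of the partition separator replaces the membership test, and the comment test moves from the line to the key).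
import Mathlib
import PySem

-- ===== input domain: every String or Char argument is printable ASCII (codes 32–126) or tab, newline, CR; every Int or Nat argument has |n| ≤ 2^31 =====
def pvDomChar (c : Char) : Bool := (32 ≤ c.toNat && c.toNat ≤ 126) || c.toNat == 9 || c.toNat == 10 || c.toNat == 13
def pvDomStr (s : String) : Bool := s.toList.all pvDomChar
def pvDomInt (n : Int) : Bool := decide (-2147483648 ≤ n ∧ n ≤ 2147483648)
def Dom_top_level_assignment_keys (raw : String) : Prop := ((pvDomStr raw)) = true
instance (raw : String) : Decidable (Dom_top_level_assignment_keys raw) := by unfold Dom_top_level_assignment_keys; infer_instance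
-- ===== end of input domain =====

-- B (alternative): instead of one stateful scan with a latching current_table flag, B indexes
-- all header line numbers, slices the line list at the first one, and filters that prefix with
-- a single predicate built from str.partition('=') applied to the key itself.

-- ===== PORT A =====
def top_level_assignment_keys (raw : String) : List String :=
  ((PySem.Str.splitlines raw).foldl
    (fun (st : PySem.Set String × Option String) line =>
      let stripped := PySem.Str.strip line
      if stripped = "" ∨ PySem.Str.startswith stripped "#" = true then st
      else if PySem.Str.startswith stripped "[" && PySem.Str.endswith stripped "]" then
        (st.1, some stripped)
      else if st.2 = none ∧ PySem.Str.isIn "=" stripped = true then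
        let key := PySem.Str.strip (((PySem.Str.splitMax? stripped "=" 1).getD []).headD "")
        if key = "" then st else (PySem.Set.add st.1 key, st.2)
      else st)
    (PySem.Set.empty, none)).1

-- ===== PORT B =====
def top_level_assignment_keys_alt (raw : String) : List String :=
  let lines := PySem.Str.splitlines raw
  let headers := ((PySem.List.enumerate lines 0).filter
      (fun p => PySem.Str.startswith (PySem.Str.strip p.2) "[" &&
                PySem.Str.endswith (PySem.Str.strip p.2) "]")).map (·.1)
  let cut : Int := headers.headD (PySem.List.len lines)
  (PySem.List.slice lines none (some cut)).foldl
    (fun (keys : PySem.Set String) line =>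
      -- str.partition("=") ported by hand (exact for the one-char separator "="):
      -- head = chars before the first '=', sep is nonempty iff '=' occurs; the tail is unused
      let s := (PySem.Str.strip line).toList
      let head := s.takeWhile (fun c => c ≠ '=')
      let sep := s.contains '='
      let key := PySem.Chars.strip head
      if sep && !key.isEmpty && !PySem.Chars.startswith key ['#'] then
        PySem.Set.add keys (String.ofList key)
      else keys)
    PySem.Set.empty

-- ===== PRECONDITION & SPEC =====
def Spec_top_level_assignment_keys (raw : String) (out : List String) : Prop := out = top_level_assignment_keys_alt raw
instance (raw : String) (out : List String) : Decidable (Spec_top_level_assignment_keys raw out) := by unfold Spec_top_level_assignment_keys; infer_instance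

-- ===== CLAIM (what is proved, stated in full; the proofs are below) =====
def Claim_equal_top_level_assignment_keys : Prop := ∀ (raw : String), Dom_top_level_assignment_keys raw → Spec_top_level_assignment_keys raw (top_level_assignment_keys raw)

-- ===== LEMMAS AND PROOFS =====

-- abbreviations for the two loop bodies (proof-side only)
def pvStepA (st : PySem.Set String × Option String) (line : String) :
    PySem.Set String × Option String :=
  let stripped := PySem.Str.strip line
  if stripped = "" ∨ PySem.Str.startswith stripped "#" = true then st
  else if PySem.Str.startswith stripped "[" && PySem.Str.endswith stripped "]" then
    (st.1, some stripped)
  else if st.2 = none ∧ PySem.Str.isIn "=" stripped = true then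
    let key := PySem.Str.strip (((PySem.Str.splitMax? stripped "=" 1).getD []).headD "")
    if key = "" then st else (PySem.Set.add st.1 key, st.2)
  else st

def pvStepB (keys : PySem.Set String) (line : String) : PySem.Set String :=
  let s := (PySem.Str.strip line).toList
  let head := s.takeWhile (fun c => c ≠ '=')
  let sep := s.contains '='
  let key := PySem.Chars.strip head
  if sep && !key.isEmpty && !PySem.Chars.startswith key ['#'] then
    PySem.Set.add keys (String.ofList key)
  else keys

def pvIsHeader (line : String) : Bool :=
  let s := PySem.Str.strip line
  PySem.Str.startswith s "[" && PySem.Str.endswith s "]"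

-- A's per-line extraction, as an Option
def pvKeyOf (line : String) : Option String :=
  let s := PySem.Str.strip line
  if s ≠ "" ∧ PySem.Str.startswith s "#" = false ∧ PySem.Str.isIn "=" s = true then
    let k := PySem.Str.strip (((PySem.Str.splitMax? s "=" 1).getD []).headD "")
    if k = "" then none else some k
  else none

-- B's per-line extraction, as an Option
def pvKeyB (line : String) : Option String :=
  let s := (PySem.Str.strip line).toList
  let key := PySem.Chars.strip (s.takeWhile (fun c => c ≠ '='))
  if s.contains '=' && !key.isEmpty && !PySem.Chars.startswith key ['#'] then
    some (String.ofList key)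
  else none

-- once current_table is set, A's keys never change
theorem pvFoldSome (ls : List String) :
    ∀ (s : PySem.Set String) (t : String),
      (ls.foldl pvStepA (s, some t)).1 = s := by
  induction ls with
  | nil => intro s t; rfl
  | cons l ls ih =>
    intro s t
    simp only [List.foldl_cons, pvStepA]
    split_ifs with h1 h2 h3 h4
    · exact ih s t
    · exact ih s _
    · exact absurd h3 (by simp)
    · exact absurd h3 (by simp)
    · exact ih s t

-- with current_table still None, A's fold = foldl Set.add over the keys of the pre-header prefix
theorem pvFoldNone (ls : List String) :
    ∀ (s : PySem.Set String),
      (ls.foldl pvStepA (s, none)).1 =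
        ((ls.takeWhile (fun l => !pvIsHeader l)).filterMap pvKeyOf).foldl PySem.Set.add s := by
  induction ls with
  | nil => intro s; rfl
  | cons l ls ih =>
    intro s
    by_cases hH : pvIsHeader l = true
    · have hH' : PySem.Chars.startswith (PySem.Chars.strip l.toList) "[".toList = true ∧
                 PySem.Chars.endswith (PySem.Chars.strip l.toList) "]".toList = true := by
        simpa [pvIsHeader, Bool.and_eq_true] using hH
      have hs : ¬ (PySem.Str.strip l = "" ∨ PySem.Str.startswith (PySem.Str.strip l) "#" = true) := by
        rintro (h | h)
        · have h0 : PySem.Chars.strip l.toList = ([] : List Char) := by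
            simpa using congrArg String.toList h
          have := (PySem.Chars.startswith_iff _ _).mp hH'.1
          rw [h0] at this
          simp at this
        · have h' : PySem.Chars.startswith (PySem.Chars.strip l.toList) "#".toList = true := by
            simpa using h
          obtain ⟨u, hu⟩ := (PySem.Chars.startswith_iff _ _).mp hH'.1
          obtain ⟨v, hv⟩ := (PySem.Chars.startswith_iff _ _).mp h'
          have : "[".toList ++ u = "#".toList ++ v := hu.trans hv.symm
          simp at this
      have hstep : pvStepA (s, none) l = (s, some (PySem.Str.strip l)) := by
        unfold pvStepA
        rw [if_neg hs, if_pos (by simpa [pvIsHeader] using hH)]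
      have hT : List.takeWhile (fun l => !pvIsHeader l) (l :: ls) = [] := by
        simp [hH]
      rw [List.foldl_cons, hstep, hT]
      simpa using pvFoldSome ls s (PySem.Str.strip l)
    · have hB : (!pvIsHeader l) = true := by simp [hH]
      have hT : List.takeWhile (fun l => !pvIsHeader l) (l :: ls) =
          l :: List.takeWhile (fun l => !pvIsHeader l) ls := by
        simp [hB]
      have hnh : ¬ (PySem.Str.startswith (PySem.Str.strip l) "[" && PySem.Str.endswith (PySem.Str.strip l) "]") = true := by
        simpa [pvIsHeader] using hH
      rw [List.foldl_cons, hT, List.filterMap_cons]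
      by_cases h1 : PySem.Str.strip l = "" ∨ PySem.Str.startswith (PySem.Str.strip l) "#" = true
      · have hk : pvKeyOf l = none := by
          unfold pvKeyOf
          rcases h1 with h | h
          · simp [h]
          · rw [if_neg]; rintro ⟨-, hf, -⟩; rw [h] at hf; cases hf
        have hstep : pvStepA (s, none) l = (s, none) := by
          unfold pvStepA; rw [if_pos h1]
        rw [hk, hstep]; exact ih s
      · have hne : PySem.Str.strip l ≠ "" := fun h => h1 (Or.inl h)
        have hnc : PySem.Str.startswith (PySem.Str.strip l) "#" = false := by
          cases hf : PySem.Str.startswith (PySem.Str.strip l) "#" with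
          | false => rfl
          | true => exact absurd (Or.inr hf) h1
        by_cases h2 : PySem.Str.isIn "=" (PySem.Str.strip l) = true
        · by_cases hk0 : PySem.Str.strip (((PySem.Str.splitMax? (PySem.Str.strip l) "=" 1).getD []).headD "") = ""
          · have hk : pvKeyOf l = none := by
              unfold pvKeyOf
              rw [if_pos ⟨hne, hnc, h2⟩, if_pos hk0]
            have hstep : pvStepA (s, none) l = (s, none) := by
              unfold pvStepA
              rw [if_neg h1, if_neg hnh, if_pos ⟨rfl, h2⟩, if_pos hk0]
            rw [hk, hstep]; exact ih s
          · have hk : pvKeyOf l = some (PySem.Str.strip (((PySem.Str.splitMax? (PySem.Str.strip l) "=" 1).getD []).headD "")) := by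
              unfold pvKeyOf
              rw [if_pos ⟨hne, hnc, h2⟩, if_neg hk0]
            have hstep : pvStepA (s, none) l =
                (PySem.Set.add s (PySem.Str.strip (((PySem.Str.splitMax? (PySem.Str.strip l) "=" 1).getD []).headD "")), none) := by
              unfold pvStepA
              rw [if_neg h1, if_neg hnh, if_pos ⟨rfl, h2⟩, if_neg hk0]
            rw [hk, hstep, List.foldl_cons]
            exact ih _
        · have hk : pvKeyOf l = none := by
            unfold pvKeyOf
            rw [if_neg]; rintro ⟨-, -, h⟩; exact h2 h
          have hstep : pvStepA (s, none) l = (s, none) := by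
            unfold pvStepA
            rw [if_neg h1, if_neg hnh, if_neg (by rintro ⟨-, h⟩; exact h2 h)]
          rw [hk, hstep]; exact ih s

-- B's fold = foldl Set.add over B's extracted keys
theorem pvFoldB (ls : List String) :
    ∀ (s : PySem.Set String),
      ls.foldl pvStepB s = (ls.filterMap pvKeyB).foldl PySem.Set.add s := by
  induction ls with
  | nil => intro s; rfl
  | cons l ls ih =>
    intro s
    rw [List.foldl_cons, List.filterMap_cons]
    by_cases hc : ((PySem.Str.strip l).toList.contains '=' &&
        !(PySem.Chars.strip ((PySem.Str.strip l).toList.takeWhile (fun c => c ≠ '='))).isEmpty &&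
        !PySem.Chars.startswith (PySem.Chars.strip ((PySem.Str.strip l).toList.takeWhile (fun c => c ≠ '='))) ['#']) = true
    · have hk : pvKeyB l = some (String.ofList (PySem.Chars.strip ((PySem.Str.strip l).toList.takeWhile (fun c => c ≠ '=')))) := by
        unfold pvKeyB; rw [if_pos hc]
      have hs : pvStepB s l = PySem.Set.add s (String.ofList (PySem.Chars.strip ((PySem.Str.strip l).toList.takeWhile (fun c => c ≠ '=')))) := by
        unfold pvStepB; rw [if_pos hc]
      rw [hk, hs, List.foldl_cons]; exact ih _
    · have hk : pvKeyB l = none := by unfold pvKeyB; rw [if_neg hc]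
      have hs : pvStepB s l = s := by unfold pvStepB; rw [if_neg hc]
      rw [hk, hs]; exact ih s

-- the go-loop of splitOnMax with maxsplit already 0 returns (piece :: acc).reverse
theorem pvGoZero (sep : List Char) (fuel : Nat) (l cur : List Char) (acc : List (List Char)) :
    ∃ x, PySem.Chars.splitOnMax.go sep fuel 0 l cur acc = (x :: acc).reverse := by
  cases fuel with
  | zero => exact ⟨cur.reverse ++ l, rfl⟩
  | succ n =>
    cases l with
    | nil => exact ⟨cur.reverse, rfl⟩
    | cons c rest =>
      refine ⟨cur.reverse ++ (c :: rest), ?_⟩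
      simp [PySem.Chars.splitOnMax.go]

-- head of the go-loop at maxsplit 1: everything before the first '='
theorem pvGoOne (fuel : Nat) :
    ∀ (l cur : List Char), l.length < fuel →
      (PySem.Chars.splitOnMax.go ['='] fuel 1 l cur []).headD [] =
        cur.reverse ++ l.takeWhile (fun c => c ≠ '=') := by
  induction fuel with
  | zero => intro l cur h; omega
  | succ n ih =>
    intro l cur h
    cases l with
    | nil => simp [PySem.Chars.splitOnMax.go]
    | cons c rest =>
      by_cases hc : c = '='
      · subst hc
        have hpre : List.isPrefixOf ['='] ('=' :: rest) = true := by
          simp [List.isPrefixOf]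
        obtain ⟨x, hx⟩ := pvGoZero ['='] n (List.drop 1 ('=' :: rest)) [] [cur.reverse]
        simp only [PySem.Chars.splitOnMax.go, if_neg (by omega : ¬ (1 : Nat) = 0), hpre,
          List.length_singleton]
        rw [hx]
        simp
      · have hpre : List.isPrefixOf ['='] (c :: rest) = false := by
          simp only [List.isPrefixOf, Bool.and_eq_false_iff, beq_eq_false_iff_ne]
          exact Or.inl fun h => hc h.symm
        simp only [PySem.Chars.splitOnMax.go, if_neg (by omega : ¬ (1 : Nat) = 0), hpre]
        rw [if_neg (by simp)]
        rw [ih rest (c :: cur) (by simpa using Nat.lt_of_succ_lt_succ h)]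
        simp [hc]

-- the head piece of cs.split('=', 1) is takeWhile (· ≠ '=')
theorem pvSplitHead (cs : List Char) :
    (PySem.Chars.splitOnMax cs ['='] 1).headD [] = cs.takeWhile (fun c => c ≠ '=') := by
  unfold PySem.Chars.splitOnMax
  rw [if_neg (by omega : ¬ (1 : Int) < 0)]
  simpa using pvGoOne (cs.length + 1) cs [] (by omega)

-- A's head-piece key, seen on the char level
theorem pvSplitHeadStr (t : String) :
    (PySem.Str.strip (((PySem.Str.splitMax? t "=" 1).getD []).headD "")).toList =
      PySem.Chars.strip (t.toList.takeWhile (fun c => c ≠ '=')) := by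
  have hmap := PySem.Str.splitMax?_map t "=" 1
  have hchars : PySem.Chars.splitMax? t.toList "=".toList 1 =
      some (PySem.Chars.splitOnMax t.toList "=".toList 1) := by
    simp [PySem.Chars.splitMax?]
  rw [hchars] at hmap
  cases hopt : PySem.Str.splitMax? t "=" 1 with
  | none => rw [hopt] at hmap; simp at hmap
  | some L =>
    rw [hopt] at hmap
    have hL : L.map String.toList = PySem.Chars.splitOnMax t.toList "=".toList 1 := by
      simpa using hmap
    have hhead : (L.headD "").toList = (L.map String.toList).headD [] := by
      cases L with
      | nil => rfl
      | cons a as => rfl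
    simp only [Option.getD_some]
    rw [PySem.Str.toList_strip, hhead, hL,
      show ("=".toList : List Char) = ['='] from rfl, pvSplitHead]

-- take at the length of a takeWhile IS the takeWhile
theorem pvTakeTakeWhile {α : Type} (p : α → Bool) (l : List α) :
    l.take ((l.takeWhile p).length) = l.takeWhile p := by
  induction l with
  | nil => rfl
  | cons a l ih =>
    by_cases h : p a
    · simp [h, ih]
    · simp [h]

-- the first header index (default len) = length of the header-free prefix
theorem pvHeadersVal (ls : List String) :
    ∀ (s : Int),
      ((((PySem.List.enumerate ls s).filter
          (fun p => PySem.Str.startswith (PySem.Str.strip p.2) "[" &&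
                    PySem.Str.endswith (PySem.Str.strip p.2) "]")).map (·.1)).headD (s + ls.length)) =
        s + ((ls.takeWhile (fun l => !pvIsHeader l)).length : Int) := by
  induction ls with
  | nil => intro s; simp [PySem.List.enumerate]
  | cons l ls ih =>
    intro s
    rw [PySem.List.enumerate_cons, List.filter_cons]
    by_cases hH : pvIsHeader l = true
    · rw [if_pos (by simpa [pvIsHeader] using hH)]
      simp [hH]
    · rw [if_neg (by simpa [pvIsHeader] using hH)]
      have hrec := ih (s + 1)
      rw [List.takeWhile_cons, if_pos (by simp [hH])]
      simp only [List.length_cons]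
      push_cast at hrec ⊢
      rw [show s + ((ls.length : Int) + 1) = s + 1 + ↑ls.length by ring, hrec]
      ring

-- dropWhile starts with a char refuting p
theorem pvDropWhileHead {α : Type} (p : α → Bool) (l : List α) (c : α)
    (h : (List.dropWhile p l).head? = some c) : p c = false := by
  induction l with
  | nil => simp [List.dropWhile] at h
  | cons a l ih =>
    by_cases hp : p a
    · rw [List.dropWhile_cons, if_pos hp] at h; exact ih h
    · rw [List.dropWhile_cons, if_neg hp] at h
      simp only [List.head?_cons, Option.some_inj] at h
      rw [← h]
      simpa using hp

-- a nonempty prefix shares the head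
theorem pvPrefixHead {α : Type} (l1 l2 : List α) (h : l1 <+: l2) (hn : l1 ≠ []) :
    l1.head? = l2.head? := by
  obtain ⟨t, rfl⟩ := h
  cases l1 with
  | nil => exact absurd rfl hn
  | cons a as => rfl

-- rstrip is a prefix of its argument
theorem pvRstripPrefix (l : List Char) : PySem.Chars.rstrip l <+: l := by
  unfold PySem.Chars.rstrip
  have h1 := List.dropWhile_suffix (l := l.reverse) PySem.Chars.isspace
  have h2 := List.reverse_prefix.mpr h1
  simpa using h2

-- the stripped pre-'=' key, when nonempty, has the same head as the line it came from (char level)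
theorem pvKeyHeadGen (l0 u s head : List Char)
    (hu : u = List.dropWhile PySem.Chars.isspace l0)
    (hs : s = PySem.Chars.rstrip u)
    (hh : head = s.takeWhile (fun c => c ≠ '='))
    (hk : PySem.Chars.strip head ≠ []) :
    (PySem.Chars.strip head).head? = s.head? := by
  have hheadne : head ≠ [] := by
    intro h; rw [h] at hk; exact hk rfl
  have h1 : head.head? = s.head? := by
    apply pvPrefixHead _ _ _ hheadne
    rw [hh]; exact List.takeWhile_prefix _
  have hsne : s ≠ [] := by
    intro h
    apply hheadne
    rw [hh, h]
    exact List.takeWhile_nil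
  have hsu : s <+: u := by rw [hs]; exact pvRstripPrefix u
  have h2 : s.head? = u.head? := pvPrefixHead _ _ hsu hsne
  have hnospace : ∀ c, head.head? = some c → PySem.Chars.isspace c = false := by
    intro c hc
    apply pvDropWhileHead PySem.Chars.isspace l0
    rw [← hu, ← h2, ← h1, hc]
  have hlstrip : PySem.Chars.lstrip head = head := by
    cases hhd : head with
    | nil => rfl
    | cons a as =>
      have ha : PySem.Chars.isspace a = false := hnospace a (by rw [hhd]; rfl)
      show List.dropWhile PySem.Chars.isspace (a :: as) = a :: as
      rw [List.dropWhile_cons, if_neg (by simp [ha])]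
  have hkeyPrefix : PySem.Chars.strip head <+: head := by
    show PySem.Chars.rstrip (PySem.Chars.lstrip head) <+: head
    rw [hlstrip]
    exact pvRstripPrefix _
  have h3 : (PySem.Chars.strip head).head? = head.head? := pvPrefixHead _ _ hkeyPrefix hk
  rw [h3, h1]

-- instantiated at a stripped line
theorem pvKeyHead (line : String)
    (hk : PySem.Chars.strip ((PySem.Str.strip line).toList.takeWhile (fun c => c ≠ '=')) ≠ []) :
    (PySem.Chars.strip ((PySem.Str.strip line).toList.takeWhile (fun c => c ≠ '='))).head? =
      (PySem.Str.strip line).toList.head? := by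
  apply pvKeyHeadGen line.toList (PySem.Chars.lstrip line.toList)
    ((PySem.Str.strip line).toList) _ rfl _ rfl hk
  rw [PySem.Str.toList_strip]
  rfl

-- startswith a single char ↔ head?
theorem pvStartswithChar (cs : List Char) (c : Char) :
    PySem.Chars.startswith cs [c] = true ↔ cs.head? = some c := by
  rw [PySem.Chars.startswith_iff]
  constructor
  · intro h
    rw [List.cons_prefix_iff] at h
    obtain ⟨l', hl, -⟩ := h
    rw [hl]; rfl
  · intro h
    cases cs with
    | nil => simp at h
    | cons a as =>
      simp only [List.head?_cons, Option.some_inj] at h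
      rw [h]
      exact ⟨as, rfl⟩

-- Python's '=' in t, as a contains test
theorem pvContainsIsIn (t : String) : PySem.Str.isIn "=" t = t.toList.contains '=' := by
  rw [PySem.Str.isIn_eq, Bool.eq_iff_iff, PySem.Chars.isIn_iff_infix,
    show ("=" : String).toList = ['='] from rfl, List.singleton_infix_iff,
    List.contains_iff_mem]

-- the '#' test on the nonempty stripped key = the '#' test on the stripped line
theorem pvHashEq (line : String)
    (hk : PySem.Chars.strip ((PySem.Str.strip line).toList.takeWhile (fun c => c ≠ '=')) ≠ []) :
    PySem.Chars.startswith
        (PySem.Chars.strip ((PySem.Str.strip line).toList.takeWhile (fun c => c ≠ '='))) ['#'] =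
      PySem.Str.startswith (PySem.Str.strip line) "#" := by
  rw [PySem.Str.startswith_eq, show ("#" : String).toList = ['#'] from rfl, Bool.eq_iff_iff,
    pvStartswithChar, pvStartswithChar, pvKeyHead line hk]

-- per line, B's extraction = A's extraction
theorem pvKeyEq (line : String) : pvKeyB line = pvKeyOf line := by
  unfold pvKeyB pvKeyOf
  by_cases hin : (PySem.Str.strip line).toList.contains '=' = true
  · by_cases hk0 : PySem.Chars.strip ((PySem.Str.strip line).toList.takeWhile (fun c => c ≠ '=')) = []
    · -- empty key: both none
      rw [if_neg (by rw [hk0]; simp)]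
      by_cases hcond : PySem.Str.strip line ≠ "" ∧
          PySem.Str.startswith (PySem.Str.strip line) "#" = false ∧
          PySem.Str.isIn "=" (PySem.Str.strip line) = true
      · rw [if_pos hcond, if_pos]
        apply String.toList_inj.mp
        rw [pvSplitHeadStr, hk0]
        rfl
      · rw [if_neg hcond]
    · have hhash := pvHashEq line hk0
      by_cases hh : PySem.Chars.startswith
          (PySem.Chars.strip ((PySem.Str.strip line).toList.takeWhile (fun c => c ≠ '='))) ['#'] = true
      · -- comment key: both none
        rw [if_neg (by rw [hh]; simp), if_neg]
        rintro ⟨-, hf, -⟩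
        rw [← hhash, hh] at hf
        cases hf
      · -- a real key: both produce the same string
        have hhf : PySem.Chars.startswith
            (PySem.Chars.strip ((PySem.Str.strip line).toList.takeWhile (fun c => c ≠ '='))) ['#'] = false :=
          Bool.eq_false_iff.mpr hh
        have hne : PySem.Str.strip line ≠ "" := by
          intro h
          rw [h] at hin
          simp at hin
        have hke : (PySem.Chars.strip ((PySem.Str.strip line).toList.takeWhile (fun c => c ≠ '='))).isEmpty = false :=
          Bool.eq_false_iff.mpr (fun h => hk0 (List.isEmpty_iff.mp h))
        rw [if_pos (by rw [hin, hke, hhf]; rfl),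
          if_pos ⟨hne, by rw [← hhash]; exact hhf, by rw [pvContainsIsIn]; exact hin⟩]
        rw [if_neg, Option.some_inj]
        · apply String.toList_inj.mp
          rw [pvSplitHeadStr, String.toList_ofList]
        · intro h
          have h2 := congrArg String.toList h
          rw [pvSplitHeadStr] at h2
          exact hk0 (by simpa using h2)
  · -- no '=': both none
    have hin' : (PySem.Str.strip line).toList.contains '=' = false := Bool.eq_false_iff.mpr hin
    rw [if_neg (by rw [hin']; simp), if_neg]
    rintro ⟨-, -, hf⟩
    rw [pvContainsIsIn, hin'] at hf
    cases hf

-- ===== VERDICT (by name: the statement is the Claim_ definition above) =====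
theorem top_level_assignment_keys_spec : Claim_equal_top_level_assignment_keys := by
  intro raw _
  unfold Spec_top_level_assignment_keys
  have hA : top_level_assignment_keys raw =
      ((PySem.Str.splitlines raw).foldl pvStepA (PySem.Set.empty, none)).1 := rfl
  have hB : top_level_assignment_keys_alt raw =
      (PySem.List.slice (PySem.Str.splitlines raw) none
        (some ((((PySem.List.enumerate (PySem.Str.splitlines raw) 0).filter
            (fun p => PySem.Str.startswith (PySem.Str.strip p.2) "[" &&
                      PySem.Str.endswith (PySem.Str.strip p.2) "]")).map (·.1)).headD
            (PySem.List.len (PySem.Str.splitlines raw))))).foldl pvStepB PySem.Set.empty := rfl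
  rw [hA, hB, pvFoldNone]
  have hcut := pvHeadersVal (PySem.Str.splitlines raw) 0
  simp only [zero_add] at hcut
  rw [PySem.List.len_eq, hcut,
    PySem.List.slice_to _ (Int.natCast_nonneg _), Int.toNat_natCast,
    pvTakeTakeWhile, pvFoldB]
  congr 1
  apply List.filterMap_congr
  intro l _
  exact (pvKeyEq l).symm
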